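-- pv_equiv track=rewrite | github.com/GeotrekCE/Geotrek-admin | mapentity/helpers.py | alphabet_enumeration
-- ===== SOURCE A (Python) =====
-- import math
-- import string
--
-- def alphabet_enumeration(length):
--     """
--     Return list of letters : A, B, ... Z, AA, AB, ...
--     See mapentity/leaflet.enumeration.js
--     """
--     if length == 0:
--         return []
--     if length == 1:
--         return ["A"]
--     width = int(math.ceil(math.log(length, 26)))
--     enums = []
--     alphabet = string.ascii_uppercase
--     for i in range(length):
--         enum = ""
--         for j in range(width):
--             enum = alphabet[i % 26] + enum
--             i = i // 26
--         enums.append(enum)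
--     return enums
-- ===== SOURCE B (Python) =====
-- import math
-- import string
-- import itertools
--
-- def alphabet_enumeration(length):
--     if length == 0:
--         return []
--     if length == 1:
--         return ["A"]
--     width = int(math.ceil(math.log(length, 26)))
--     return ["".join(t) for _, t in
--             zip(range(length), itertools.product(string.ascii_uppercase, repeat=width))]
-- ===== Notes on version B (the rewrite author's own statement) =====
-- stated objective: idiomatic
-- what changed: Replaces the per-index %26///26 digit-building loop with itertools.product over the uppercase alphabet, which yields the fixed-width base-26 labels in the same odometer order, truncated to the first `length`.
import Mathlib
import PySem

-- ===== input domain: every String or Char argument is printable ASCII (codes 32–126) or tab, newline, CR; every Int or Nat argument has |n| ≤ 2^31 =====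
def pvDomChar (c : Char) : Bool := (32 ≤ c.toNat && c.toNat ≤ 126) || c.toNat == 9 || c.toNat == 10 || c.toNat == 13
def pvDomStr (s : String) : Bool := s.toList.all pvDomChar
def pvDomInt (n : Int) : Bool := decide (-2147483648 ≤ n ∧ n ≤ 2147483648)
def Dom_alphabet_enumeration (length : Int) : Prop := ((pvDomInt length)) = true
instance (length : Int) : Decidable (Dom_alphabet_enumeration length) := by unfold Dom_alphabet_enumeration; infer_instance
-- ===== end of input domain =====

-- B generates the fixed-width base-26 labels with a product (odometer) enumeration instead of
-- A's per-index %26 // 26 digit loop; same cost, more idiomatic.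

-- string.ascii_uppercase
def pvAlphabet : List Char :=
  ['A','B','C','D','E','F','G','H','I','J','K','L','M','N','O','P','Q','R','S','T','U','V','W','X','Y','Z']

-- exact value of `int(math.ceil(math.log(length, 26)))` for 2 ≤ length ≤ 2^31
-- (the float expression was checked against this exact threshold table on all base-26 boundaries);
-- used by BOTH ports, since Source B computes the same Python expression.
def pvWidth (length : Int) : Nat :=
  if length ≤ 26 then 1 else if length ≤ 676 then 2 else if length ≤ 17576 then 3
  else if length ≤ 456976 then 4 else if length ≤ 11881376 then 5
  else if length ≤ 308915776 then 6 else 7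

-- ===== PORT A =====
-- inner loop `for j in range(width): enum = alphabet[i % 26] + enum; i = i // 26`,
-- enum carried as List Char (String.mk at the end is exact); i % 26 is always in [0, 26),
-- so indexing via .toNat/getD is exact here.
def pvADigits : Nat → Int → List Char → List Char
  | 0, _, enum => enum
  | j+1, i, enum => pvADigits j (PySem.Int.floordiv i 26) (pvAlphabet.getD (PySem.Int.mod i 26).toNat 'A' :: enum)

def alphabet_enumeration (length : Int) : List String :=
  if length == 0 then [] else
  if length == 1 then ["A"] else
  let width := pvWidth length
  (PySem.List.pyRange 0 length 1).foldl (fun enums i => enums ++ [String.mk (pvADigits width i [])]) []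

-- ===== PORT B =====
-- itertools.product(string.ascii_uppercase, repeat=w): all width-w tuples in lexicographic
-- order, rightmost position advancing fastest (ported by hand, exact).
def pvTuples : Nat → List (List Char)
  | 0 => [[]]
  | w+1 => (pvTuples w).flatMap (fun t => pvAlphabet.map (fun c => t ++ [c]))

def alphabet_enumeration_alt (length : Int) : List String :=
  if length == 0 then [] else
  if length == 1 then ["A"] else
  ((pvTuples (pvWidth length)).take length.toNat).map (fun t => String.mk t)

-- ===== PRECONDITION & SPEC =====
-- Pre_ excludes negative length, on which A raises ValueError (math.log of a negative number).
def Pre_alphabet_enumeration (length : Int) : Prop := 0 ≤ length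
instance (length : Int) : Decidable (Pre_alphabet_enumeration length) := by
  unfold Pre_alphabet_enumeration; infer_instance
def pvWitness_alphabet_enumeration : Int := (30)

def Spec_alphabet_enumeration (length : Int) (out : List String) : Prop := out = alphabet_enumeration_alt length
instance (length : Int) (out : List String) : Decidable (Spec_alphabet_enumeration length out) := by unfold Spec_alphabet_enumeration; infer_instance

-- ===== CLAIM (what is proved, stated in full; the proofs are below) =====
def Claim_equal_alphabet_enumeration : Prop := ∀ (length : Int), Dom_alphabet_enumeration length → Pre_alphabet_enumeration length → Spec_alphabet_enumeration length (alphabet_enumeration length)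

-- ===== LEMMAS AND PROOFS =====

-- big-endian fixed-width base-26 digit string of i (low digit appended last)
def pvRep : Nat → Nat → List Char
  | 0, _ => []
  | w+1, i => pvRep w (i / 26) ++ [pvAlphabet.getD (i % 26) 'A']

theorem pvADigits_eq (w : Nat) : ∀ (i : Int), 0 ≤ i → ∀ acc,
    pvADigits w i acc = pvRep w i.toNat ++ acc := by
  induction w with
  | zero => intro i hi acc; simp [pvADigits, pvRep]
  | succ w ih =>
    intro i hi acc
    obtain ⟨m, rfl⟩ := Int.eq_ofNat_of_zero_le hi
    have hfd : PySem.Int.floordiv (m : Int) 26 = ((m / 26 : Nat) : Int) :=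
      PySem.Int.floordiv_natCast m 26
    have hmod : PySem.Int.mod (m : Int) 26 = ((m % 26 : Nat) : Int) :=
      PySem.Int.mod_natCast m 26
    rw [pvADigits, hfd, hmod, ih _ (by positivity)]
    rw [show ((m / 26 : Nat) : Int).toNat = m / 26 from by omega,
        show ((m % 26 : Nat) : Int).toNat = m % 26 from by omega, pvRep, List.append_assoc]
    simp

theorem pvRange_mul_flatMap (f : Nat → List Char) (b : Nat) : ∀ (a : Nat),
    (List.range (a * b)).map f
      = (List.range a).flatMap (fun q => (List.range b).map (fun r => f (q * b + r))) := by
  intro a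
  induction a with
  | zero => simp
  | succ a ih =>
    have : (a + 1) * b = a * b + b := by ring
    rw [this, List.range_add, List.map_append, ih, List.range_succ, List.flatMap_append]
    simp [List.map_map, Function.comp]

theorem pvMap_eq_range_map {α β : Type} (g : α → β) (d : α) : ∀ (l : List α),
    l.map g = (List.range l.length).map (fun r => g (l.getD r d)) := by
  intro l
  induction l with
  | nil => simp
  | cons x xs ih =>
    rw [List.map_cons, List.length_cons, List.range_succ_eq_map, List.map_cons, List.map_map]
    refine congrArg₂ _ (by simp) ?_
    rw [ih]
    exact (List.map_congr_left (fun r _ => by simp [Function.comp])).symm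

theorem pvTuples_eq (w : Nat) : pvTuples w = (List.range (26 ^ w)).map (pvRep w) := by
  induction w with
  | zero => simp [pvTuples, pvRep]
  | succ w ih =>
    rw [pvTuples, ih]
    have hpow : 26 ^ (w + 1) = 26 ^ w * 26 := by ring
    rw [hpow, pvRange_mul_flatMap, List.flatMap_map]
    apply List.flatMap_congr
    intro q _
    rw [pvMap_eq_range_map (fun c => pvRep w q ++ [c]) 'A' pvAlphabet]
    have h26 : pvAlphabet.length = 26 := by decide
    rw [h26]
    apply List.map_congr_left
    intro r hr
    have hr26 : r < 26 := List.mem_range.mp hr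
    show pvRep w q ++ [pvAlphabet.getD r 'A'] = pvRep (w + 1) (q * 26 + r)
    rw [pvRep]
    have h1 : (q * 26 + r) / 26 = q := by omega
    have h2 : (q * 26 + r) % 26 = r := by omega
    rw [h1, h2]

theorem pvLen_le_pow (length : Int) (h2 : 2 ≤ length) (hub : length ≤ 2147483648) :
    length.toNat ≤ 26 ^ pvWidth length := by
  unfold pvWidth
  split_ifs <;> omega

theorem alphabet_enumeration_spec : Claim_equal_alphabet_enumeration := by
  intro length hdom hpre
  unfold Spec_alphabet_enumeration alphabet_enumeration alphabet_enumeration_alt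
  by_cases h0 : length = 0
  · simp [h0]
  by_cases h1 : length = 1
  · simp [h1]
  have h0' : (length == 0) = false := by simp [h0]
  have h1' : (length == 1) = false := by simp [h1]
  rw [h0', h1']
  simp only [Bool.false_eq_true, if_false]
  have h2 : 2 ≤ length := by
    unfold Pre_alphabet_enumeration at hpre; omega
  have hub : length ≤ 2147483648 := by
    unfold Dom_alphabet_enumeration pvDomInt at hdom
    simp at hdom; omega
  -- A side: foldl-append over pyRange is a map
  rw [PySem.List.foldl_append_singleton_eq_map, List.nil_append,
      PySem.List.pyRange_one 0 length]
  simp only [sub_zero, List.map_map]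
  -- B side: tuples → map over range, take
  rw [pvTuples_eq, ← List.map_take, List.take_range,
      Nat.min_eq_left (pvLen_le_pow length h2 hub), List.map_map]
  apply List.map_congr_left
  intro k hk
  have hk' : (0 : Int) ≤ 0 + (k : Int) := by positivity
  have hkt : ((0 : Int) + (k : Int)).toNat = k := by omega
  simp only [Function.comp, pvADigits_eq (pvWidth length) _ hk', hkt, List.append_nil]
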